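-- pv_equiv track=rewrite | github.com/zousiyu1995/leetcode | src/p2559.py | vowelStrings
-- ===== SOURCE A (Python) =====
-- from typing import List
--
-- def vowelStrings(words: List[str], queries: List[List[int]]) -> List[int]:
--     # 前缀和
--     n: int = len(words)
--     presum: List[int] = [0] * (n + 1)
--     # [1, n]
--     for i in range(1, n + 1):
--         # 检查第n-1个元素是否以元音开头和结尾
--         if words[i - 1][0] in "aeiou" and words[i - 1][-1] in "aeiou":
--             presum[i] = presum[i - 1] + 1
--         else:
--             presum[i] = presum[i - 1] + 0
--
--     ans: List[int] = []
--     for l, r in queries: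
--         ans.append(presum[r + 1] - presum[l])
--
--     return ans
-- ===== SOURCE B (Python) =====
-- from typing import List
-- from bisect import bisect_left, bisect_right
--
-- def vowelStrings(words: List[str], queries: List[List[int]]) -> List[int]:
--     pos: List[int] = []
--     for i, w in enumerate(words):
--         if w[0] in "aeiou" and w[-1] in "aeiou":
--             pos.append(i)
--     ans: List[int] = []
--     for q in queries:
--         ans.append(bisect_right(pos, q[1]) - bisect_left(pos, q[0]))
--     return ans
-- ===== Notes on version B (the rewrite author's own statement) =====
-- stated objective: alternative
-- what changed: Replaces the dense prefix-sum array answered by O(1) subtraction with a sorted list of the vowel-bounded word indices, answering each query by binary search (bisect_right(pos,r) - bisect_left(pos,l)).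
-- intended difference: On queries with a negative l or r (still inside Python's wraparound index range, so A returns), A's prefix-sum lookups silently wrap to the end of the array and yield an accidental wrapped difference, while B counts the vowel-bounded indices actually lying in the inclusive range [l, r] (clamped at 0), the intended range semantics; the two differ exactly when a vowel-bounded word index falls in the wrapped region. — e.g. on vowelStrings(["aa"], [[-1, 0]]): A returns [0], B returns [1]
import Mathlib
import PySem

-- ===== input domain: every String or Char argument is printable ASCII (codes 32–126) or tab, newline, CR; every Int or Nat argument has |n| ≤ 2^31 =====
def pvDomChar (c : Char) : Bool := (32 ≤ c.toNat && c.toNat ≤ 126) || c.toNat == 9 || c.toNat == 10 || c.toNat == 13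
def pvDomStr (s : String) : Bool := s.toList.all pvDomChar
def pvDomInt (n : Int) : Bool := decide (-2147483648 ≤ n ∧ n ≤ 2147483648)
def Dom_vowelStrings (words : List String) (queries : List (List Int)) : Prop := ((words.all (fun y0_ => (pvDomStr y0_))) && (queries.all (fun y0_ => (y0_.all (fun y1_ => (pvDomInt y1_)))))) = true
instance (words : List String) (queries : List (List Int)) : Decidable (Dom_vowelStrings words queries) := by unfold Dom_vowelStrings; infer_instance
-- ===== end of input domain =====

-- B replaces A's dense prefix-sum array (O(1) subtraction per query) with a sorted list of the
-- vowel-bounded word indices answered by binary search (bisect): a different data structure of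
-- similar cost, not claimed faster. A mutates nothing; the claim is about the return value.

-- ===== PORT A =====
-- c in "aeiou" (none = the IndexError already happened; Pre_ rules it out)
def pvAIn (oc : Option Char) : Bool :=
  match oc with
  | some c => PySem.Chars.isIn [c] "aeiou".toList
  | none => false

-- w[0] in "aeiou" and w[-1] in "aeiou"
def pvGoodW (w : String) : Bool :=
  pvAIn (PySem.Str.pyGet? w 0) && pvAIn (PySem.Str.pyGet? w (-1))

def vowelStrings (words : List String) (queries : List (List Int)) : List Int :=
  let n : Nat := words.length
  let presum0 : List Int := List.replicate (n + 1) 0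
  let presum : List Int :=
    (PySem.List.pyRange 1 ((n : Int) + 1) 1).foldl
      (fun p i =>
        let w : String := (PySem.List.pyGet? words (i - 1)).getD ""
        if pvGoodW w then
          PySem.List.pySetD p i (PySem.List.pyGetD p (i - 1) 0 + 1)
        else
          PySem.List.pySetD p i (PySem.List.pyGetD p (i - 1) 0 + 0))
      presum0
  queries.foldl
    (fun ans q =>
      match q with
      | [l, r] => ans ++ [PySem.List.pyGetD presum (r + 1) 0 - PySem.List.pyGetD presum l 0]
      | _ => ans)
    []

-- ===== PORT B =====
def vowelStrings_alt (words : List String) (queries : List (List Int)) : List Int :=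
  let pos : List Int :=
    (PySem.List.enumerate words).foldl
      (fun acc iw => if pvGoodW iw.2 then acc ++ [iw.1] else acc)
      []
  queries.foldl
    (fun ans q =>
      ans ++ [((PySem.List.bisectRight pos (PySem.List.pyGetD q 1 0) : Nat) : Int)
        - ((PySem.List.bisectLeft pos (PySem.List.pyGetD q 0 0) : Nat) : Int)])
    []

-- ===== PRECONDITION & SPEC =====
-- Pre_ excludes exactly the inputs where both Pythons raise: an empty-string word (IndexError at
-- w[0]), a query that is not a pair (unpacking ValueError), and a query index outside the range
-- where A's presum[r+1] / presum[l] lookups are within Python's index range (IndexError).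
def Pre_vowelStrings (words : List String) (queries : List (List Int)) : Prop :=
  (∀ w ∈ words, w ≠ "") ∧
  ∀ q ∈ queries, q.length = 2 ∧
    -((words.length : Int) + 1) ≤ q.getD 0 0 ∧ q.getD 0 0 ≤ (words.length : Int) ∧
    -((words.length : Int) + 2) ≤ q.getD 1 0 ∧ q.getD 1 0 ≤ (words.length : Int) - 1
instance (words : List String) (queries : List (List Int)) : Decidable (Pre_vowelStrings words queries) := by
  unfold Pre_vowelStrings; infer_instance

def pvWitness_vowelStrings : List String × List (List Int) := (["ab", "aa"], [[0, 1], [1, 1]])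

-- where a negative Python prefix-sum index x lands (0 when x is non-negative)
def pvWrap (words : List String) (x : Int) : Int := if x < 0 then x + words.length + 1 else 0

-- On queries with a negative l or r (still inside Python's wraparound index range, so A returns),
-- A's prefix-sum lookups wrap to the end of the array and yield an accidental wrapped difference,
-- while B counts the vowel-bounded indices actually in the inclusive range [l, r] (clamped at 0);
-- the two differ exactly when some vowel-bounded word index k lies between where l and r+1 land.
def D_vowelStrings (words : List String) (queries : List (List Int)) : Prop :=
  ∃ q ∈ queries, ∃ k ∈ List.range words.length, pvGoodW (words.getD k "") ∧
    ¬((k : Int) < pvWrap words (q.getD 0 0) ↔ (k : Int) < pvWrap words (q.getD 1 0 + 1))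
instance (words : List String) (queries : List (List Int)) : Decidable (D_vowelStrings words queries) := by
  unfold D_vowelStrings; infer_instance

def Spec_vowelStrings (words : List String) (queries : List (List Int)) (out : List Int) : Prop :=
  ¬ D_vowelStrings words queries → out = vowelStrings_alt words queries
instance (words : List String) (queries : List (List Int)) (out : List Int) : Decidable (Spec_vowelStrings words queries out) := by
  unfold Spec_vowelStrings; infer_instance

def pvDiffWitness_vowelStrings : List String × List (List Int) := (["aa"], [[-1, 0]])
def pvDiffWitnessOut_vowelStrings : (List Int) × (List Int) := ([0], [1])

-- ===== CLAIM (what is proved, stated in full; the proofs are below) =====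
def Claim_unchanged_vowelStrings : Prop := ∀ (words : List String) (queries : List (List Int)), Dom_vowelStrings words queries → Pre_vowelStrings words queries → Spec_vowelStrings words queries (vowelStrings words queries)
def Claim_changed_vowelStrings : Prop := Dom_vowelStrings (pvDiffWitness_vowelStrings.1) (pvDiffWitness_vowelStrings.2) ∧ Pre_vowelStrings (pvDiffWitness_vowelStrings.1) (pvDiffWitness_vowelStrings.2) ∧ D_vowelStrings (pvDiffWitness_vowelStrings.1) (pvDiffWitness_vowelStrings.2) ∧ vowelStrings (pvDiffWitness_vowelStrings.1) (pvDiffWitness_vowelStrings.2) = pvDiffWitnessOut_vowelStrings.1 ∧ vowelStrings_alt (pvDiffWitness_vowelStrings.1) (pvDiffWitness_vowelStrings.2) = pvDiffWitnessOut_vowelStrings.2 ∧ pvDiffWitnessOut_vowelStrings.1 ≠ pvDiffWitnessOut_vowelStrings.2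
def Claim_exact_vowelStrings : Prop := ∀ (words : List String) (queries : List (List Int)), Dom_vowelStrings words queries → Pre_vowelStrings words queries → D_vowelStrings words queries → vowelStrings words queries ≠ vowelStrings_alt words queries

-- ===== LEMMAS AND PROOFS =====

def pvVowel (c : Char) : Bool := ['a', 'e', 'i', 'o', 'u'].contains c
def pvGood (w : String) : Bool :=
  ((w.toList.head?.map pvVowel).getD false) && ((w.toList.getLast?.map pvVowel).getD false)

theorem isIn_vowels (c : Char) : PySem.Chars.isIn [c] ['a','e','i','o','u'] = pvVowel c := by
  simp only [pvVowel]
  rcases hb : PySem.Chars.isIn [c] ['a','e','i','o','u'] with _ | _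
  · rw [PySem.Chars.isIn_eq_false_iff, List.singleton_infix_iff] at hb
    simp [hb]
  · rw [PySem.Chars.isIn_iff_infix, List.singleton_infix_iff] at hb
    simp [hb]

theorem goodcheck_eq (w : String) : pvGoodW w = pvGood w := by
  unfold pvGoodW
  have h0 : PySem.Str.pyGet? w 0 = w.toList.head? := by
    simp [pysem, PySem.List.pyGet?_zero, List.head?_eq_getElem?]
  have h1 : PySem.Str.pyGet? w (-1) = w.toList.getLast? := by
    simp [pysem, PySem.List.pyGet?_neg_one]
  rw [h0, h1, pvGood]
  rcases hh : w.toList.head? with _ | c <;> rcases hl : w.toList.getLast? with _ | d <;>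
    simp [pvAIn, isIn_vowels]

def pvC (words : List String) (m : Nat) : Nat :=
  (List.range m).countP (fun k => pvGood (words.getD k ""))

theorem pvC_succ (words : List String) (j : Nat) :
    pvC words (j+1) = pvC words j + (if pvGood (words.getD j "") then 1 else 0) := by
  simp [pvC, List.range_succ, List.countP_append, List.countP_cons]

theorem pv_set_mid {α : Type} (A : List α) (x : α) (t : List α) (v : α) :
    (A ++ x :: t).set A.length v = A ++ v :: t := by
  induction A with
  | nil => simp
  | cons a A ih => simp [List.set_cons_succ, ih]

theorem pv_presum_inv (words : List String) (step : List Int → Int → List Int)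
    (hstep : ∀ (p : List Int) (i : Int),
      step p i = if pvGood ((PySem.List.pyGet? words (i - 1)).getD "") then
          PySem.List.pySetD p i (PySem.List.pyGetD p (i - 1) 0 + 1)
        else
          PySem.List.pySetD p i (PySem.List.pyGetD p (i - 1) 0 + 0))
    (j : Nat) (hj : j ≤ words.length) :
    (PySem.List.pyRange 1 ((j : Int) + 1) 1).foldl step (List.replicate (words.length + 1) 0) =
      (List.range (j + 1)).map (fun k => (pvC words k : Int)) ++
        List.replicate (words.length - j) 0 := by
  induction j with
  | zero =>
    rw [PySem.List.pyRange_one_eq_nil (by omega)]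
    simp [pvC, List.replicate_succ]
  | succ j ih =>
    have h1 : ((j+1:Nat):Int) + 1 = ((j:Int) + 1) + 1 := by push_cast; ring
    rw [h1, PySem.List.pyRange_one_succ_right (by omega), List.foldl_append, ih (by omega)]
    simp only [List.foldl_cons, List.foldl_nil]
    rw [hstep]
    have hidx : ((j:Int) + 1 - 1) = (j:Int) := by ring
    have hget : (PySem.List.pyGet? words ((j:Int))).getD "" = words.getD j "" := by
      rw [PySem.List.pyGet?_natCast]
      exact List.getD_eq_getElem?_getD.symm
    have hlenmap : ((List.range (j+1)).map (fun k => (pvC words k : Int))).length = j + 1 := by simp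
    have hgetD : PySem.List.pyGetD
        ((List.range (j+1)).map (fun k => (pvC words k : Int)) ++ List.replicate (words.length - j) 0)
        ((j:Int)) 0 = (pvC words j : Int) := by
      rw [PySem.List.pyGetD_natCast]
      rw [List.getD_eq_getElem?_getD, List.getElem?_append_left (by simpa using Nat.lt_succ_self j)]
      simp
    have hrep : List.replicate (words.length - j) (0:Int) = 0 :: List.replicate (words.length - (j+1)) 0 := by
      rw [← List.replicate_succ]
      congr 1
      omega
    have hset : ∀ v : Int,
        PySem.List.pySetD
          ((List.range (j+1)).map (fun k => (pvC words k : Int)) ++ List.replicate (words.length - j) 0)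
          ((j:Int)+1) v =
        (List.range (j+1)).map (fun k => (pvC words k : Int)) ++ v :: List.replicate (words.length - (j+1)) 0 := by
      intro v
      have hcast : ((j:Int)+1) = ((j+1:Nat):Int) := by push_cast; ring
      rw [hcast, PySem.List.pySetD_natCast, hrep]
      have hmid := pv_set_mid ((List.range (j+1)).map (fun k => (pvC words k : Int))) 0
        (List.replicate (words.length - (j+1)) 0) v
      rw [hlenmap] at hmid
      exact hmid
    rw [hidx, hget, hgetD]
    have hfin : ∀ v : Int,
        (List.range (j+1)).map (fun k => (pvC words k : Int)) ++ v :: List.replicate (words.length - (j+1)) 0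
        = ((List.range (j+1)).map (fun k => (pvC words k : Int)) ++ [v]) ++ List.replicate (words.length - (j+1)) 0 := by
      intro v; simp
    have hg' : pvGood (words[j]?.getD "") = pvGood (words.getD j "") := by
      rw [← List.getD_eq_getElem?_getD]
    by_cases hg : pvGood (words.getD j "") = true
    · rw [if_pos hg, hset, hfin]
      rw [List.range_succ (n := j+1)]
      simp [pvC_succ, hg']
      exact hg
    · rw [if_neg hg, hset, hfin]
      rw [List.range_succ (n := j+1)]
      simp [pvC_succ, hg']
      simpa using hg

def pvPosOf (words : List String) (p : String → Bool) : List Int :=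
  ((List.range words.length).filter (fun k => p (words.getD k ""))).map Int.ofNat

theorem pv_enum_filter (words : List String) (p : String → Bool) :
    ((PySem.List.enumerate words).filter (fun iw => p iw.2)).map (·.1) = pvPosOf words p := by
  unfold pvPosOf
  rw [PySem.List.enumerate_eq_map_pyRange (d := "")]
  simp only [PySem.List.len_eq]
  rw [PySem.List.pyRange_zero_nat]
  rw [List.filter_map, List.map_map, List.filter_map]
  simp only [Function.comp_def, PySem.List.pyGetD_natCast, List.getD_eq_getElem?_getD,
    List.map_map, List.map_id', List.bind_eq_flatMap]
  rfl

theorem pv_countP_prefix (xs : List Int) (p : Int → Bool) (m : Nat) (hm : m ≤ xs.length)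
    (h1 : ∀ j (hj : j < xs.length), j < m → p xs[j] = true)
    (h2 : ∀ j (hj : j < xs.length), m ≤ j → p xs[j] = false) : xs.countP p = m := by
  induction xs generalizing m with
  | nil => simpa using (Nat.le_zero.mp (by simpa using hm)).symm
  | cons x xs ih =>
    cases m with
    | zero =>
      rw [List.countP_eq_zero]
      intro a ha
      obtain ⟨j, hj, rfl⟩ := List.mem_iff_getElem.mp ha
      simp [h2 j hj (Nat.zero_le _)]
    | succ m =>
      rw [List.countP_cons]
      have hx : p x = true := h1 0 (by simp) (Nat.succ_pos _)
      rw [ih m (by simpa using hm)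
        (fun j hj hjm => h1 (j+1) (by simpa using hj) (by omega))
        (fun j hj hjm => h2 (j+1) (by simpa using hj) (by omega))]
      simp [hx]

theorem pv_bisectLeft_countP (pos : List Int) (hs : pos.Pairwise (· ≤ ·)) (x : Int) :
    PySem.List.bisectLeft pos x = pos.countP (fun i => decide (i < x)) := by
  obtain ⟨hle, h1, h2⟩ := PySem.List.bisectLeft_spec pos x hs
  exact (pv_countP_prefix pos _ _ hle
    (fun j hj hjm => by simpa using h1 j hj hjm)
    (fun j hj hjm => by simpa using not_lt.mpr (h2 j hj hjm))).symm

theorem pv_bisectRight_countP (pos : List Int) (hs : pos.Pairwise (· ≤ ·)) (x : Int) :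
    PySem.List.bisectRight pos x = pos.countP (fun i => decide (i ≤ x)) := by
  obtain ⟨hle, h1, h2⟩ := PySem.List.bisectRight_spec pos x hs
  exact (pv_countP_prefix pos _ _ hle
    (fun j hj hjm => by simpa using h1 j hj hjm)
    (fun j hj hjm => by simpa using not_le.mpr (h2 j hj hjm))).symm

theorem pvC_zero (words : List String) : pvC words 0 = 0 := rfl

theorem pvC_le (words : List String) {a b : Nat} (h : a ≤ b) : pvC words a ≤ pvC words b := by
  unfold pvC
  obtain ⟨t, rfl⟩ := Nat.exists_eq_add_of_le h
  rw [List.range_add, List.countP_append]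
  omega

theorem pvC_eq_of_no_good (words : List String) {a b : Nat} (hab : a ≤ b)
    (h : ∀ k, a ≤ k → k < b → pvGood (words.getD k "") = false) :
    pvC words b = pvC words a := by
  unfold pvC
  obtain ⟨t, rfl⟩ := Nat.exists_eq_add_of_le hab
  rw [List.range_add, List.countP_append]
  have : (List.countP (fun k => pvGood (words.getD k "")) ((List.range t).map (a + ·))) = 0 := by
    rw [List.countP_eq_zero]
    intro x hx
    obtain ⟨y, hy, rfl⟩ := List.mem_map.mp hx
    simp only [h (a + y) (by omega) (by have := List.mem_range.mp hy; omega)]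
    exact Bool.false_ne_true
  omega

theorem pvC_lt_of_good (words : List String) {a b k : Nat} (ha : a ≤ k) (hb : k < b)
    (hg : pvGood (words.getD k "") = true) : pvC words a < pvC words b := by
  have h1 : pvC words a ≤ pvC words k := pvC_le words ha
  have h2 : pvC words (k+1) ≤ pvC words b := pvC_le words hb
  have := pvC_succ words k
  rw [if_pos hg] at this
  omega

theorem pv_countP_range_lt (p : Nat → Bool) {m n : Nat} (h : m ≤ n) :
    (List.range n).countP (fun k => decide (k < m) && p k) = (List.range m).countP p := by
  obtain ⟨t, rfl⟩ := Nat.exists_eq_add_of_le h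
  rw [List.range_add, List.countP_append]
  have h1 : (List.countP (fun k => decide (k < m) && p k) ((List.range t).map (m + ·))) = 0 := by
    rw [List.countP_eq_zero]
    intro x hx
    obtain ⟨y, hy, rfl⟩ := List.mem_map.mp hx
    simp
  rw [h1]
  have h2 : (List.range m).countP (fun k => decide (k < m) && p k) = (List.range m).countP p := by
    apply List.countP_congr
    intro x hx
    simp [List.mem_range.mp hx]
  omega

theorem pv_presum_get (words : List String) (j : Int)
    (h1 : -((words.length : Int) + 1) ≤ j) (h2 : j ≤ (words.length : Int)) :
    PySem.List.pyGetD ((List.range (words.length + 1)).map (fun k => (pvC words k : Int))) j 0 =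
      (pvC words (if 0 ≤ j then j.toNat else (j + words.length + 1).toNat) : Int) := by
  by_cases hj : 0 ≤ j
  · rw [if_pos hj, PySem.List.pyGetD_of_nonneg _ _ hj]
    rw [List.getD_eq_getElem?_getD, List.getElem?_map, List.getElem?_range (by omega)]
    rfl
  · rw [if_neg hj]
    have hk : j = -(((-j).toNat : Nat) : Int) := by omega
    have hlen : ((List.range (words.length + 1)).map (fun k => (pvC words k : Int))).length
        = words.length + 1 := by simp
    have hgd : ∀ (xs : List Int) (i d : Int), PySem.List.pyGetD xs i d = (PySem.List.pyGet? xs i).getD d := by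
      intro xs i d
      simp [PySem.List.pyGetD, PySem.List.pyGet?]
    rw [hgd]
    rw [hk, PySem.List.pyGet?_neg_natCast _ _ (by omega) (by rw [hlen]; omega)]
    rw [hlen, List.getElem?_map, List.getElem?_range (by omega)]
    have : words.length + 1 - (-j).toNat = (j + words.length + 1).toNat := by omega
    rw [this]
    simp only [Option.map_some, Option.getD_some]
    congr 2
    omega

theorem pv_pos_closed (words : List String) (p : String → Bool) :
    (pvPosOf words p).Pairwise (· ≤ ·) := by
  unfold pvPosOf
  apply List.Pairwise.map
  · intro a b (hab : a < b)
    exact le_of_lt (Int.ofNat_lt.mpr hab)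
  · exact (List.pairwise_lt_range).filter _

theorem pv_bisectR (words : List String) (r : Int) (hr : r ≤ (words.length : Int) - 1) :
    (PySem.List.bisectRight (pvPosOf words pvGood) r : Int)
    = (pvC words (if r < 0 then 0 else (r+1).toNat) : Int) := by
  rw [pv_bisectRight_countP _ (pv_pos_closed words _) r]
  unfold pvPosOf
  rw [List.countP_map, List.countP_filter]
  simp only [Function.comp_def, Int.ofNat_eq_natCast]
  by_cases hneg : r < 0
  · rw [if_pos hneg]
    have : ((List.range words.length).countP fun (a : Nat) => decide ((a:Int) ≤ r) && pvGood (words.getD a "")) = 0 := by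
      rw [List.countP_eq_zero]
      intro a _
      have : ¬((a : Int) ≤ r) := by omega
      rw [decide_eq_false this]
      simp
    rw [this, pvC_zero]
  · rw [if_neg hneg]
    have hcong : ((List.range words.length).countP fun (a : Nat) => decide ((a:Int) ≤ r) && pvGood (words.getD a ""))
        = ((List.range words.length).countP fun a => decide (a < (r+1).toNat) && pvGood (words.getD a "")) := by
      apply List.countP_congr
      intro a _
      have : ((a : Int) ≤ r) ↔ (a < (r+1).toNat) := by omega
      rw [decide_eq_decide.mpr this]
    rw [hcong, pv_countP_range_lt _ (by omega)]
    rfl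

theorem pv_bisectL (words : List String) (l : Int) (hl : l ≤ (words.length : Int)) :
    (PySem.List.bisectLeft (pvPosOf words pvGood) l : Int)
    = (pvC words (if l < 0 then 0 else l.toNat) : Int) := by
  rw [pv_bisectLeft_countP _ (pv_pos_closed words _) l]
  unfold pvPosOf
  rw [List.countP_map, List.countP_filter]
  simp only [Function.comp_def, Int.ofNat_eq_natCast]
  by_cases hneg : l < 0
  · rw [if_pos hneg]
    have : ((List.range words.length).countP fun (a : Nat) => decide ((a:Int) < l) && pvGood (words.getD a "")) = 0 := by
      rw [List.countP_eq_zero]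
      intro a _
      have : ¬((a : Int) < l) := by omega
      rw [decide_eq_false this]
      simp
    rw [this, pvC_zero]
  · rw [if_neg hneg]
    have hcong : ((List.range words.length).countP fun (a : Nat) => decide ((a:Int) < l) && pvGood (words.getD a ""))
        = ((List.range words.length).countP fun a => decide (a < l.toNat) && pvGood (words.getD a "")) := by
      apply List.countP_congr
      intro a _
      have : ((a : Int) < l) ↔ (a < l.toNat) := by omega
      rw [decide_eq_decide.mpr this]
    rw [hcong, pv_countP_range_lt _ (by omega)]
    rfl

theorem pv_query_foldl (queries : List (List Int)) (g : Int → Int → Int) (acc : List Int)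
    (hq : ∀ q ∈ queries, q.length = 2) :
    queries.foldl (fun ans q => match q with
      | [l, r] => ans ++ [g l r]
      | _ => ans) acc = acc ++ queries.map (fun q => g (q.getD 0 0) (q.getD 1 0)) := by
  induction queries generalizing acc with
  | nil => simp
  | cons q rest ih =>
    obtain ⟨a, b, rfl⟩ := List.length_eq_two.mp (hq q (by simp))
    rw [List.foldl_cons, ih (acc ++ [g a b]) (fun x hx => hq x (List.mem_cons_of_mem _ hx))]
    simp

theorem pv_wrap_val (words : List String) (l r : Int)
    (hl1 : -((words.length:Int)+1) ≤ l) (hl2 : l ≤ (words.length:Int))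
    (hr1 : -((words.length:Int)+2) ≤ r) (hr2 : r ≤ (words.length:Int) - 1) :
    PySem.List.pyGetD ((List.range (words.length + 1)).map (fun k => (pvC words k : Int))) (r+1) 0
      - PySem.List.pyGetD ((List.range (words.length + 1)).map (fun k => (pvC words k : Int))) l 0
    = ((PySem.List.bisectRight (pvPosOf words pvGood) r : Nat) : Int)
      - ((PySem.List.bisectLeft (pvPosOf words pvGood) l : Nat) : Int)
      + (pvC words (if r ≤ -2 then r + (words.length:Int) + 2 else 0).toNat : Int)
      - (pvC words (if l < 0 then l + (words.length:Int) + 1 else 0).toNat : Int) := by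
  rw [pv_presum_get words (r+1) (by omega) (by omega), pv_presum_get words l (by omega) (by omega),
    pv_bisectR words r hr2, pv_bisectL words l hl2]
  by_cases hl0 : l < 0 <;> by_cases hr0 : r ≤ -2
  · simp only [if_pos hl0, if_pos hr0, if_neg (by omega : ¬ 0 ≤ r + 1), if_neg (by omega : ¬ 0 ≤ l),
      if_pos (by omega : r < 0),
      show r + 1 + (words.length:Int) + 1 = r + (words.length:Int) + 2 from by ring, pvC_zero]
    omega
  · simp only [if_pos hl0, if_neg hr0, if_neg (by omega : ¬ 0 ≤ l), Int.toNat_zero, pvC_zero]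
    by_cases hrn : r < 0
    · simp only [if_pos (by omega : 0 ≤ r + 1), if_pos hrn,
        show (r+1).toNat = 0 from by omega, pvC_zero]
      omega
    · simp only [if_pos (by omega : 0 ≤ r + 1), if_neg hrn]
      omega
  · simp only [if_neg hl0, if_pos hr0, if_neg (by omega : ¬ 0 ≤ r + 1), if_pos (by omega : 0 ≤ l),
      if_pos (by omega : r < 0), Int.toNat_zero, pvC_zero,
      show r + 1 + (words.length:Int) + 1 = r + (words.length:Int) + 2 from by ring]
    omega
  · simp only [if_neg hl0, if_neg hr0, if_pos (by omega : 0 ≤ l), Int.toNat_zero, pvC_zero]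
    by_cases hrn : r < 0
    · simp only [if_pos (by omega : 0 ≤ r + 1), if_pos hrn,
        show (r+1).toNat = 0 from by omega, pvC_zero]
      omega
    · simp only [if_pos (by omega : 0 ≤ r + 1), if_neg hrn]
      omega

theorem pv_xor_iff (words : List String) (l r : Int) (k : Nat) :
    (¬((k : Int) < pvWrap words l ↔ (k : Int) < pvWrap words (r + 1)))
    ↔ (min (if l < 0 then l + (words.length : Int) + 1 else 0)
          (if r ≤ -2 then r + (words.length : Int) + 2 else 0) ≤ (k : Int)
       ∧ (k : Int) < max (if l < 0 then l + (words.length : Int) + 1 else 0)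
          (if r ≤ -2 then r + (words.length : Int) + 2 else 0)) := by
  simp only [pvWrap]
  by_cases hl0 : l < 0 <;> by_cases hr0 : r + 1 < 0 <;>
    simp [hl0, hr0, show (r ≤ -2) ↔ (r + 1 < 0) from by omega] <;> omega

theorem pv_query_eq (words : List String) (l r : Int)
    (hl1 : -((words.length:Int)+1) ≤ l) (hl2 : l ≤ (words.length:Int))
    (hr1 : -((words.length:Int)+2) ≤ r) (hr2 : r ≤ (words.length:Int) - 1)
    (hnd : ¬ ∃ k ∈ List.range words.length, pvGood (words.getD k "") = true ∧
      min (if l < 0 then l + (words.length : Int) + 1 else 0)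
          (if r ≤ -2 then r + (words.length : Int) + 2 else 0) ≤ (k : Int) ∧
      (k : Int) < max (if l < 0 then l + (words.length : Int) + 1 else 0)
          (if r ≤ -2 then r + (words.length : Int) + 2 else 0)) :
    PySem.List.pyGetD ((List.range (words.length + 1)).map (fun k => (pvC words k : Int))) (r+1) 0
      - PySem.List.pyGetD ((List.range (words.length + 1)).map (fun k => (pvC words k : Int))) l 0
    = ((PySem.List.bisectRight (pvPosOf words pvGood) r : Nat) : Int)
      - ((PySem.List.bisectLeft (pvPosOf words pvGood) l : Nat) : Int) := by
  rw [pv_wrap_val words l r hl1 hl2 hr1 hr2]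
  set U : Int := if l < 0 then l + (words.length : Int) + 1 else 0 with hU
  set V : Int := if r ≤ -2 then r + (words.length : Int) + 2 else 0 with hV
  have hU0 : 0 ≤ U ∧ U ≤ (words.length:Int) := by rw [hU]; split <;> omega
  have hV0 : 0 ≤ V ∧ V ≤ (words.length:Int) := by rw [hV]; split <;> omega
  have hkey : pvC words V.toNat = pvC words U.toNat := by
    rcases le_total U V with huv | huv
    · exact pvC_eq_of_no_good words (a := U.toNat) (b := V.toNat) (by omega)
        (fun k hk1 hk2 => by
          by_contra hgk
          exact hnd ⟨k, List.mem_range.mpr (by omega), by simpa using hgk,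
            by omega, by omega⟩)
    · exact (pvC_eq_of_no_good words (a := V.toNat) (b := U.toNat) (by omega)
        (fun k hk1 hk2 => by
          by_contra hgk
          exact hnd ⟨k, List.mem_range.mpr (by omega), by simpa using hgk,
            by omega, by omega⟩)).symm
  omega

theorem pv_query_ne (words : List String) (l r : Int)
    (hl1 : -((words.length:Int)+1) ≤ l) (hl2 : l ≤ (words.length:Int))
    (hr1 : -((words.length:Int)+2) ≤ r) (hr2 : r ≤ (words.length:Int) - 1)
    (hd : ∃ k ∈ List.range words.length, pvGood (words.getD k "") = true ∧
      min (if l < 0 then l + (words.length : Int) + 1 else 0)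
          (if r ≤ -2 then r + (words.length : Int) + 2 else 0) ≤ (k : Int) ∧
      (k : Int) < max (if l < 0 then l + (words.length : Int) + 1 else 0)
          (if r ≤ -2 then r + (words.length : Int) + 2 else 0)) :
    PySem.List.pyGetD ((List.range (words.length + 1)).map (fun k => (pvC words k : Int))) (r+1) 0
      - PySem.List.pyGetD ((List.range (words.length + 1)).map (fun k => (pvC words k : Int))) l 0
    ≠ ((PySem.List.bisectRight (pvPosOf words pvGood) r : Nat) : Int)
      - ((PySem.List.bisectLeft (pvPosOf words pvGood) l : Nat) : Int) := by
  rw [pv_wrap_val words l r hl1 hl2 hr1 hr2]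
  obtain ⟨k, hk, hg, hk1, hk2⟩ := hd
  set U : Int := if l < 0 then l + (words.length : Int) + 1 else 0 with hU
  set V : Int := if r ≤ -2 then r + (words.length : Int) + 2 else 0 with hV
  have hU0 : 0 ≤ U ∧ U ≤ (words.length:Int) := by rw [hU]; split <;> omega
  have hV0 : 0 ≤ V ∧ V ≤ (words.length:Int) := by rw [hV]; split <;> omega
  rcases le_total U V with huv | huv
  · have hlt : pvC words U.toNat < pvC words V.toNat :=
      pvC_lt_of_good words (a := U.toNat) (b := V.toNat) (k := k) (by omega) (by omega) hg
    omega
  · have hlt : pvC words V.toNat < pvC words U.toNat :=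
      pvC_lt_of_good words (a := V.toNat) (b := U.toNat) (k := k) (by omega) (by omega) hg
    omega

theorem pv_A_map (words : List String) (queries : List (List Int))
    (hq : ∀ q ∈ queries, q.length = 2) :
    vowelStrings words queries = queries.map (fun q =>
      PySem.List.pyGetD ((List.range (words.length + 1)).map (fun k => (pvC words k : Int))) (q.getD 1 0 + 1) 0
      - PySem.List.pyGetD ((List.range (words.length + 1)).map (fun k => (pvC words k : Int))) (q.getD 0 0) 0) := by
  have hps := pv_presum_inv words
    (fun p i =>
      if pvGoodW ((PySem.List.pyGet? words (i - 1)).getD "") then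
        PySem.List.pySetD p i (PySem.List.pyGetD p (i - 1) 0 + 1)
      else
        PySem.List.pySetD p i (PySem.List.pyGetD p (i - 1) 0 + 0))
    (fun p i => by beta_reduce; rw [goodcheck_eq]) words.length (le_refl _)
  simp only [vowelStrings]
  rw [hps]
  simp only [Nat.sub_self, List.replicate_zero, List.append_nil]
  exact pv_query_foldl queries _ [] hq

theorem pv_B_map (words : List String) (queries : List (List Int))
    (hq : ∀ q ∈ queries, q.length = 2) :
    vowelStrings_alt words queries = queries.map (fun q =>
      ((PySem.List.bisectRight (pvPosOf words pvGood) (q.getD 1 0) : Nat) : Int)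
      - ((PySem.List.bisectLeft (pvPosOf words pvGood) (q.getD 0 0) : Nat) : Int)) := by
  simp only [vowelStrings_alt]
  rw [PySem.List.foldl_append_if (fun iw : Int × String => pvGoodW iw.2) (·.1)
      (PySem.List.enumerate words) []]
  simp only [goodcheck_eq, List.nil_append]
  rw [pv_enum_filter words pvGood]
  rw [PySem.List.foldl_append_singleton_eq_map]
  simp only [List.nil_append]
  apply List.map_congr_left
  intro q hq2
  obtain ⟨a, c, rfl⟩ := List.length_eq_two.mp (hq q hq2)
  rfl

-- ===== VERDICT (by name: the statement is the Claim_ definition above) =====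
theorem vowelStrings_spec : Claim_unchanged_vowelStrings := by
  intro words queries _ hpre hnd
  rw [pv_A_map words queries (fun q hq => (hpre.2 q hq).1),
    pv_B_map words queries (fun q hq => (hpre.2 q hq).1)]
  apply List.map_congr_left
  intro q hq
  obtain ⟨hlen, hb1, hb2, hb3, hb4⟩ := hpre.2 q hq
  refine pv_query_eq words (q.getD 0 0) (q.getD 1 0) hb1 hb2 hb3 hb4 ?_
  rintro ⟨k, hk, hg, h1, h2⟩
  refine hnd ⟨q, hq, k, hk, ?_, (pv_xor_iff words _ _ k).mpr ⟨h1, h2⟩⟩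
  rw [goodcheck_eq]
  exact hg

theorem vowelStrings_changed : Claim_changed_vowelStrings := by
  unfold Claim_changed_vowelStrings; decide

theorem vowelStrings_tight : Claim_exact_vowelStrings := by
  intro words queries _ hpre hd heq
  obtain ⟨q, hq, hdisj⟩ := hd
  rw [pv_A_map words queries (fun q hq => (hpre.2 q hq).1),
    pv_B_map words queries (fun q hq => (hpre.2 q hq).1)] at heq
  obtain ⟨_, hb1, hb2, hb3, hb4⟩ := hpre.2 q hq
  obtain ⟨k, hk, hg, hx⟩ := hdisj
  rw [goodcheck_eq] at hg
  exact pv_query_ne words (q.getD 0 0) (q.getD 1 0) hb1 hb2 hb3 hb4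
    ⟨k, hk, hg, (pv_xor_iff words _ _ k).mp hx⟩
    (List.map_inj_left.mp heq q hq)
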